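-- pv_equiv track=rewrite | github.com/techstar9797/Parts | fff_gradio_app.py | _packages_compatible
-- ===== SOURCE A (Python) =====
-- def _packages_compatible(pkg1: str, pkg2: str) -> bool:
--     """Check if packages are compatible"""
--     compatible_groups = [
--         ["SOIC-8", "SOP-8", "MSOP-8"],
--         ["DIP-8", "PDIP-8"],
--         ["QFN-8", "DFN-8"],
--         ["SOT-23", "SOT-223"]
--     ]
--
--     for group in compatible_groups:
--         if pkg1 in group and pkg2 in group:
--             return True
--     return False
-- ===== SOURCE B (Python) =====
-- _COMPATIBLE_GROUPS = [
--     ["SOIC-8", "SOP-8", "MSOP-8"],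
--     ["DIP-8", "PDIP-8"],
--     ["QFN-8", "DFN-8"],
--     ["SOT-23", "SOT-223"]
-- ]
--
-- # name -> index of its compatibility group, built once
-- _GROUP_INDEX = {name: i
--                 for i, group in enumerate(_COMPATIBLE_GROUPS)
--                 for name in group}
--
--
-- def _packages_compatible(pkg1: str, pkg2: str) -> bool:
--     """Check if packages are compatible"""
--     g1 = _GROUP_INDEX.get(pkg1)
--     return g1 is not None and g1 == _GROUP_INDEX.get(pkg2)
-- ===== Notes on version B (the rewrite author's own statement) =====
-- stated objective: idiomatic
-- what changed: Replaces the per-query scan over all groups (membership test of both names in each group) by a precomputed name-to-group-index dictionary built once, answering each query with two lookups and a None guard.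
import Mathlib
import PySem

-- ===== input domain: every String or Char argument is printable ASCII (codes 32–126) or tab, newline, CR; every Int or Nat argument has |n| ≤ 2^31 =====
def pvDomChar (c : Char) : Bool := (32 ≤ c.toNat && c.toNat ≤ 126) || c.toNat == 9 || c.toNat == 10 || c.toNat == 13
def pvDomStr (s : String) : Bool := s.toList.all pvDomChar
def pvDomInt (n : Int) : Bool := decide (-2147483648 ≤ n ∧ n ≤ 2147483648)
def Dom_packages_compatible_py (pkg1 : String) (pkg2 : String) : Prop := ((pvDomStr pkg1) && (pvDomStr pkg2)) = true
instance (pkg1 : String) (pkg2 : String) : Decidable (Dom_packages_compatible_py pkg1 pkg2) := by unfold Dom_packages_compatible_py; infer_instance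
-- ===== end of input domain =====

-- B replaces A's per-query scan over the group table by a name→group-index dictionary built
-- once, answering each query with two lookups and a None guard (objective: idiomatic).

-- ===== PORT A =====
-- the `compatible_groups` local constant of A
def pvCompatibleGroups : List (List String) :=
  [["SOIC-8", "SOP-8", "MSOP-8"],
   ["DIP-8", "PDIP-8"],
   ["QFN-8", "DFN-8"],
   ["SOT-23", "SOT-223"]]

-- A's loop: return True on the first group containing both names, else False
def packages_compatible_py (pkg1 : String) (pkg2 : String) : Bool :=
  pvCompatibleGroups.any (fun group => group.contains pkg1 && group.contains pkg2)

-- ===== PORT B =====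
-- Source B's module constants: the group table and the comprehension-built name→index dict
def pvGroupsB : List (List String) :=
  [["SOIC-8", "SOP-8", "MSOP-8"],
   ["DIP-8", "PDIP-8"],
   ["QFN-8", "DFN-8"],
   ["SOT-23", "SOT-223"]]

def pvGroupIndex : PySem.Dict String Int :=
  (PySem.List.enumerate pvGroupsB).foldl
    (fun d ig => ig.2.foldl (fun d name => d.insert name ig.1) d)
    PySem.Dict.empty

-- Source B: g1 = _GROUP_INDEX.get(pkg1); return g1 is not None and g1 == _GROUP_INDEX.get(pkg2)
def packages_compatible_py_alt (pkg1 : String) (pkg2 : String) : Bool :=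
  match pvGroupIndex.get? pkg1 with
  | none => false
  | some g1 => some g1 == pvGroupIndex.get? pkg2

-- ===== PRECONDITION & SPEC =====
def Spec_packages_compatible_py (pkg1 : String) (pkg2 : String) (out : Bool) : Prop := out = packages_compatible_py_alt pkg1 pkg2
instance (pkg1 : String) (pkg2 : String) (out : Bool) : Decidable (Spec_packages_compatible_py pkg1 pkg2 out) := by unfold Spec_packages_compatible_py; infer_instance

-- ===== CLAIM (what is proved, stated in full; the proofs are below) =====
def Claim_equal_packages_compatible_py : Prop := ∀ (pkg1 : String) (pkg2 : String), Dom_packages_compatible_py pkg1 pkg2 → Spec_packages_compatible_py pkg1 pkg2 (packages_compatible_py pkg1 pkg2)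

-- ===== LEMMAS AND PROOFS =====
-- the comprehension-built index, evaluated to its literal association list
theorem pvGroupIndex_eval : pvGroupIndex = PySem.Dict.mk
    [("SOIC-8",0),("SOP-8",0),("MSOP-8",0),("DIP-8",1),("PDIP-8",1),
     ("QFN-8",2),("DFN-8",2),("SOT-23",3),("SOT-223",3)] := by decide

-- A = B for all strings: case analysis on which (if any) group name each argument equals
theorem pv_key (pkg1 pkg2 : String) :
    packages_compatible_py pkg1 pkg2 = packages_compatible_py_alt pkg1 pkg2 := by
  by_cases h0 : pkg1 = "SOIC-8"
  · subst h0
    by_cases g0 : pkg2 = "SOIC-8"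
    · subst g0; decide
    by_cases g1 : pkg2 = "SOP-8"
    · subst g1; decide
    by_cases g2 : pkg2 = "MSOP-8"
    · subst g2; decide
    by_cases g3 : pkg2 = "DIP-8"
    · subst g3; decide
    by_cases g4 : pkg2 = "PDIP-8"
    · subst g4; decide
    by_cases g5 : pkg2 = "QFN-8"
    · subst g5; decide
    by_cases g6 : pkg2 = "DFN-8"
    · subst g6; decide
    by_cases g7 : pkg2 = "SOT-23"
    · subst g7; decide
    by_cases g8 : pkg2 = "SOT-223"
    · subst g8; decide
    simp [packages_compatible_py, packages_compatible_py_alt, pvCompatibleGroups, pvGroupIndex_eval, PySem.Dict.get?, List.contains_eq_mem, g0, Ne.symm g0, g1, Ne.symm g1, g2, Ne.symm g2, g3, Ne.symm g3, g4, Ne.symm g4, g5, Ne.symm g5, g6, Ne.symm g6, g7, Ne.symm g7, g8, Ne.symm g8]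
  by_cases h1 : pkg1 = "SOP-8"
  · subst h1
    by_cases g0 : pkg2 = "SOIC-8"
    · subst g0; decide
    by_cases g1 : pkg2 = "SOP-8"
    · subst g1; decide
    by_cases g2 : pkg2 = "MSOP-8"
    · subst g2; decide
    by_cases g3 : pkg2 = "DIP-8"
    · subst g3; decide
    by_cases g4 : pkg2 = "PDIP-8"
    · subst g4; decide
    by_cases g5 : pkg2 = "QFN-8"
    · subst g5; decide
    by_cases g6 : pkg2 = "DFN-8"
    · subst g6; decide
    by_cases g7 : pkg2 = "SOT-23"
    · subst g7; decide
    by_cases g8 : pkg2 = "SOT-223"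
    · subst g8; decide
    simp [packages_compatible_py, packages_compatible_py_alt, pvCompatibleGroups, pvGroupIndex_eval, PySem.Dict.get?, List.contains_eq_mem, g0, Ne.symm g0, g1, Ne.symm g1, g2, Ne.symm g2, g3, Ne.symm g3, g4, Ne.symm g4, g5, Ne.symm g5, g6, Ne.symm g6, g7, Ne.symm g7, g8, Ne.symm g8]
  by_cases h2 : pkg1 = "MSOP-8"
  · subst h2
    by_cases g0 : pkg2 = "SOIC-8"
    · subst g0; decide
    by_cases g1 : pkg2 = "SOP-8"
    · subst g1; decide
    by_cases g2 : pkg2 = "MSOP-8"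
    · subst g2; decide
    by_cases g3 : pkg2 = "DIP-8"
    · subst g3; decide
    by_cases g4 : pkg2 = "PDIP-8"
    · subst g4; decide
    by_cases g5 : pkg2 = "QFN-8"
    · subst g5; decide
    by_cases g6 : pkg2 = "DFN-8"
    · subst g6; decide
    by_cases g7 : pkg2 = "SOT-23"
    · subst g7; decide
    by_cases g8 : pkg2 = "SOT-223"
    · subst g8; decide
    simp [packages_compatible_py, packages_compatible_py_alt, pvCompatibleGroups, pvGroupIndex_eval, PySem.Dict.get?, List.contains_eq_mem, g0, Ne.symm g0, g1, Ne.symm g1, g2, Ne.symm g2, g3, Ne.symm g3, g4, Ne.symm g4, g5, Ne.symm g5, g6, Ne.symm g6, g7, Ne.symm g7, g8, Ne.symm g8]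
  by_cases h3 : pkg1 = "DIP-8"
  · subst h3
    by_cases g0 : pkg2 = "SOIC-8"
    · subst g0; decide
    by_cases g1 : pkg2 = "SOP-8"
    · subst g1; decide
    by_cases g2 : pkg2 = "MSOP-8"
    · subst g2; decide
    by_cases g3 : pkg2 = "DIP-8"
    · subst g3; decide
    by_cases g4 : pkg2 = "PDIP-8"
    · subst g4; decide
    by_cases g5 : pkg2 = "QFN-8"
    · subst g5; decide
    by_cases g6 : pkg2 = "DFN-8"
    · subst g6; decide
    by_cases g7 : pkg2 = "SOT-23"
    · subst g7; decide
    by_cases g8 : pkg2 = "SOT-223"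
    · subst g8; decide
    simp [packages_compatible_py, packages_compatible_py_alt, pvCompatibleGroups, pvGroupIndex_eval, PySem.Dict.get?, List.contains_eq_mem, g0, Ne.symm g0, g1, Ne.symm g1, g2, Ne.symm g2, g3, Ne.symm g3, g4, Ne.symm g4, g5, Ne.symm g5, g6, Ne.symm g6, g7, Ne.symm g7, g8, Ne.symm g8]
  by_cases h4 : pkg1 = "PDIP-8"
  · subst h4
    by_cases g0 : pkg2 = "SOIC-8"
    · subst g0; decide
    by_cases g1 : pkg2 = "SOP-8"
    · subst g1; decide
    by_cases g2 : pkg2 = "MSOP-8"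
    · subst g2; decide
    by_cases g3 : pkg2 = "DIP-8"
    · subst g3; decide
    by_cases g4 : pkg2 = "PDIP-8"
    · subst g4; decide
    by_cases g5 : pkg2 = "QFN-8"
    · subst g5; decide
    by_cases g6 : pkg2 = "DFN-8"
    · subst g6; decide
    by_cases g7 : pkg2 = "SOT-23"
    · subst g7; decide
    by_cases g8 : pkg2 = "SOT-223"
    · subst g8; decide
    simp [packages_compatible_py, packages_compatible_py_alt, pvCompatibleGroups, pvGroupIndex_eval, PySem.Dict.get?, List.contains_eq_mem, g0, Ne.symm g0, g1, Ne.symm g1, g2, Ne.symm g2, g3, Ne.symm g3, g4, Ne.symm g4, g5, Ne.symm g5, g6, Ne.symm g6, g7, Ne.symm g7, g8, Ne.symm g8]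
  by_cases h5 : pkg1 = "QFN-8"
  · subst h5
    by_cases g0 : pkg2 = "SOIC-8"
    · subst g0; decide
    by_cases g1 : pkg2 = "SOP-8"
    · subst g1; decide
    by_cases g2 : pkg2 = "MSOP-8"
    · subst g2; decide
    by_cases g3 : pkg2 = "DIP-8"
    · subst g3; decide
    by_cases g4 : pkg2 = "PDIP-8"
    · subst g4; decide
    by_cases g5 : pkg2 = "QFN-8"
    · subst g5; decide
    by_cases g6 : pkg2 = "DFN-8"
    · subst g6; decide
    by_cases g7 : pkg2 = "SOT-23"
    · subst g7; decide
    by_cases g8 : pkg2 = "SOT-223"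
    · subst g8; decide
    simp [packages_compatible_py, packages_compatible_py_alt, pvCompatibleGroups, pvGroupIndex_eval, PySem.Dict.get?, List.contains_eq_mem, g0, Ne.symm g0, g1, Ne.symm g1, g2, Ne.symm g2, g3, Ne.symm g3, g4, Ne.symm g4, g5, Ne.symm g5, g6, Ne.symm g6, g7, Ne.symm g7, g8, Ne.symm g8]
  by_cases h6 : pkg1 = "DFN-8"
  · subst h6
    by_cases g0 : pkg2 = "SOIC-8"
    · subst g0; decide
    by_cases g1 : pkg2 = "SOP-8"
    · subst g1; decide
    by_cases g2 : pkg2 = "MSOP-8"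
    · subst g2; decide
    by_cases g3 : pkg2 = "DIP-8"
    · subst g3; decide
    by_cases g4 : pkg2 = "PDIP-8"
    · subst g4; decide
    by_cases g5 : pkg2 = "QFN-8"
    · subst g5; decide
    by_cases g6 : pkg2 = "DFN-8"
    · subst g6; decide
    by_cases g7 : pkg2 = "SOT-23"
    · subst g7; decide
    by_cases g8 : pkg2 = "SOT-223"
    · subst g8; decide
    simp [packages_compatible_py, packages_compatible_py_alt, pvCompatibleGroups, pvGroupIndex_eval, PySem.Dict.get?, List.contains_eq_mem, g0, Ne.symm g0, g1, Ne.symm g1, g2, Ne.symm g2, g3, Ne.symm g3, g4, Ne.symm g4, g5, Ne.symm g5, g6, Ne.symm g6, g7, Ne.symm g7, g8, Ne.symm g8]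
  by_cases h7 : pkg1 = "SOT-23"
  · subst h7
    by_cases g0 : pkg2 = "SOIC-8"
    · subst g0; decide
    by_cases g1 : pkg2 = "SOP-8"
    · subst g1; decide
    by_cases g2 : pkg2 = "MSOP-8"
    · subst g2; decide
    by_cases g3 : pkg2 = "DIP-8"
    · subst g3; decide
    by_cases g4 : pkg2 = "PDIP-8"
    · subst g4; decide
    by_cases g5 : pkg2 = "QFN-8"
    · subst g5; decide
    by_cases g6 : pkg2 = "DFN-8"
    · subst g6; decide
    by_cases g7 : pkg2 = "SOT-23"
    · subst g7; decide
    by_cases g8 : pkg2 = "SOT-223"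
    · subst g8; decide
    simp [packages_compatible_py, packages_compatible_py_alt, pvCompatibleGroups, pvGroupIndex_eval, PySem.Dict.get?, List.contains_eq_mem, g0, Ne.symm g0, g1, Ne.symm g1, g2, Ne.symm g2, g3, Ne.symm g3, g4, Ne.symm g4, g5, Ne.symm g5, g6, Ne.symm g6, g7, Ne.symm g7, g8, Ne.symm g8]
  by_cases h8 : pkg1 = "SOT-223"
  · subst h8
    by_cases g0 : pkg2 = "SOIC-8"
    · subst g0; decide
    by_cases g1 : pkg2 = "SOP-8"
    · subst g1; decide
    by_cases g2 : pkg2 = "MSOP-8"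
    · subst g2; decide
    by_cases g3 : pkg2 = "DIP-8"
    · subst g3; decide
    by_cases g4 : pkg2 = "PDIP-8"
    · subst g4; decide
    by_cases g5 : pkg2 = "QFN-8"
    · subst g5; decide
    by_cases g6 : pkg2 = "DFN-8"
    · subst g6; decide
    by_cases g7 : pkg2 = "SOT-23"
    · subst g7; decide
    by_cases g8 : pkg2 = "SOT-223"
    · subst g8; decide
    simp [packages_compatible_py, packages_compatible_py_alt, pvCompatibleGroups, pvGroupIndex_eval, PySem.Dict.get?, List.contains_eq_mem, g0, Ne.symm g0, g1, Ne.symm g1, g2, Ne.symm g2, g3, Ne.symm g3, g4, Ne.symm g4, g5, Ne.symm g5, g6, Ne.symm g6, g7, Ne.symm g7, g8, Ne.symm g8]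
  simp [packages_compatible_py, packages_compatible_py_alt, pvCompatibleGroups, pvGroupIndex_eval, PySem.Dict.get?, List.contains_eq_mem, h0, Ne.symm h0, h1, Ne.symm h1, h2, Ne.symm h2, h3, Ne.symm h3, h4, Ne.symm h4, h5, Ne.symm h5, h6, Ne.symm h6, h7, Ne.symm h7, h8, Ne.symm h8]

-- ===== VERDICT (by name: the statement is the Claim_ definition above) =====
theorem packages_compatible_py_spec : Claim_equal_packages_compatible_py := by
  intro pkg1 pkg2 _
  exact pv_key pkg1 pkg2
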